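-- pv_equiv track=rewrite | github.com/Bobcatsoap/jy-server | cell/RoomType6Calculator.py | is_f_single
-- ===== SOURCE A (Python) =====
-- import copy
--
-- def is_f_single(cards):
--     # 带单飞机
--     if len(cards) < 8:
--         return False
--     if len(cards) % 4 != 0:
--         return False
--     new_cards = copy.deepcopy(cards)
--     three = []
--     # 找到所有的三张
--     for card in new_cards:
--         if new_cards.count(card) >= 3 and card not in three:
--             three.append(card)
--         # 没有飞机
--     if len(three) == 0:
--         return False
--     three.sort()
--     # 判断三张相连的牌
--     three_connect = []
--     for i in range(0, len(three) - 1):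
--         if three[i] + 1 == three[i + 1]:
--             if three[i] not in three_connect:
--                 three_connect.append(three[i])
--             if three[i + 1] not in three_connect:
--                 three_connect.append(three[i + 1])
--     # 如果相连的三连对小于2不能构成飞机
--     if len(three_connect) < 2:
--         return False
--     for i in three_connect:
--         if i >= 15:
--             return False
--     # 记录三连对的组合长度
--     three_connect_length = len(three_connect)
--     # 移除所有三张
--     for card in three_connect:
--         # 移除
--         count = 0
--         for card in new_cards:
--             if count == 3:
--                 break
--             new_cards.remove(card)
--             count += 1
--
--     if len(new_cards) != three_connect_length:
--         return False
--     return True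
-- ===== SOURCE B (Python) =====
-- def is_f_single(cards):
--     n = len(cards)
--     if n < 8 or n % 4 != 0:
--         return False
--     cnt = {}
--     for c in cards:
--         cnt[c] = cnt.get(c, 0) + 1
--     triples = [v for v, k in cnt.items() if k >= 3]
--     if not triples:
--         return False
--     connected = [v for v in triples if v - 1 in triples or v + 1 in triples]
--     if len(connected) < 2 or any(v >= 15 for v in connected):
--         return False
--     return n == 4 * len(connected)
-- ===== Notes on version B (the rewrite author's own statement) =====
-- stated objective: simpler
-- what changed: Replaces A's deepcopy + sort + pairwise-adjacency scan + destructive remove-while-iterating loop by a single frequency dict, a neighbour-membership pass over the triple values, and the closed-form length check n == 4*len(connected).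
import Mathlib
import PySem

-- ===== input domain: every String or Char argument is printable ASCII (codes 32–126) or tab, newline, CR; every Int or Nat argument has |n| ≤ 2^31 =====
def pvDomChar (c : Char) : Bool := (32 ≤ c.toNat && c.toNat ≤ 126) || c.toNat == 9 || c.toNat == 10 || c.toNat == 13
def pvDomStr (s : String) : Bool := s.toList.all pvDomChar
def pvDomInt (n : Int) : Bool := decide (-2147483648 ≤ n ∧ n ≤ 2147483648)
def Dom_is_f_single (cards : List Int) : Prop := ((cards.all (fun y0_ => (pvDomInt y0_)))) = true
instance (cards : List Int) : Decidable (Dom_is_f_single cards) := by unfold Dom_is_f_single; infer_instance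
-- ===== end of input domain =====

-- B replaces A's deepcopy + sort + adjacency scan + destructive remove loop by a frequency
-- dict, a neighbour-membership pass and the closed-form check n == 4*len(connected) (simpler).


-- ===== PORT A =====
-- Python's inner 'for card in new_cards: if count == 3: break; new_cards.remove(card); count += 1':
-- the list iterator is an index i into the live list; each step reads l[i], removes the first
-- occurrence of that value, and stops at count == 3 or when i runs past the end.  The 'none'
-- branch of remove? is unreachable (the removed value was just read from the list).
def pyRemoveInner (l : List Int) (i : Nat) (count : Nat) : List Int :=
  if h : i < l.length then
    if count = 3 then l
    else
      match h' : PySem.List.remove? l l[i] with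
      | some l' => pyRemoveInner l' (i + 1) (count + 1)
      | none => l
  else l
termination_by l.length - i
decreasing_by
  have hm : l[i] ∈ l := List.getElem_mem h
  have he := PySem.List.remove?_eq_some_erase l l[i] hm
  have hlen := List.length_erase_of_mem hm
  rw [he] at h'
  cases h'
  omega

def is_f_single (cards : List Int) : Bool :=
  if cards.length < 8 then false
  else if cards.length % 4 ≠ 0 then false
  else
    -- new_cards = copy.deepcopy(cards): same int values
    let new_cards := cards
    let three := new_cards.foldl (fun acc card =>
      if 3 ≤ new_cards.count card ∧ card ∉ acc then acc ++ [card] else acc) ([] : List Int)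
    if three.length = 0 then false
    else
      let threeS := PySem.List.sorted three (fun x => x) false
      let tc := (PySem.List.pyRange 0 ((threeS.length : Int) - 1) 1).foldl (fun tc i =>
          if PySem.List.pyGetD threeS i 0 + 1 = PySem.List.pyGetD threeS (i + 1) 0 then
            let tc1 := if PySem.List.pyGetD threeS i 0 ∈ tc then tc
                       else tc ++ [PySem.List.pyGetD threeS i 0]
            if PySem.List.pyGetD threeS (i + 1) 0 ∈ tc1 then tc1
            else tc1 ++ [PySem.List.pyGetD threeS (i + 1) 0]
          else tc) ([] : List Int)
      if tc.length < 2 then false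
      else if tc.any (fun i => 15 ≤ i) then false
      else
        let final := tc.foldl (fun nc _ => pyRemoveInner nc 0 0) new_cards
        if final.length ≠ tc.length then false else true

-- ===== PORT B =====
def is_f_single_alt (cards : List Int) : Bool :=
  let n := cards.length
  if n < 8 ∨ n % 4 ≠ 0 then false
  else
    let cnt := cards.foldl (fun d c => d.insert c (d.getD c 0 + 1))
      (PySem.Dict.empty : PySem.Dict Int Int)
    let triples := (cnt.items.filter (fun p => 3 ≤ p.2)).map (fun p => p.1)
    if triples = [] then false
    else
      let connected := triples.filter (fun v => v - 1 ∈ triples ∨ v + 1 ∈ triples)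
      if connected.length < 2 ∨ connected.any (fun v => 15 ≤ v) then false
      else decide (n = 4 * connected.length)

-- ===== PRECONDITION & SPEC =====
def Spec_is_f_single (cards : List Int) (out : Bool) : Prop := out = is_f_single_alt cards
instance (cards : List Int) (out : Bool) : Decidable (Spec_is_f_single cards out) := by unfold Spec_is_f_single; infer_instance

-- ===== CLAIM (what is proved, stated in full; the proofs are below) =====
def Claim_equal_is_f_single : Prop := ∀ (cards : List Int), Dom_is_f_single cards → Spec_is_f_single cards (is_f_single cards)

-- ===== LEMMAS AND PROOFS =====

-- ---- the length evolution of the remove loop depends only on the length ----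

def remLen (m i c : Nat) : Nat :=
  if i < m then (if c = 3 then m else remLen (m - 1) (i + 1) (c + 1)) else m
termination_by m - i

def sFun (m : Nat) : Nat :=
  if 5 ≤ m then m - 3 else if 3 ≤ m then m - 2 else if 1 ≤ m then m - 1 else 0

def sIter : Nat → Nat → Nat
  | 0, m => m
  | k + 1, m => sIter k (sFun m)

lemma pyRemoveInner_length (l : List Int) (i c : Nat) :
    (pyRemoveInner l i c).length = remLen l.length i c := by
  fun_induction pyRemoveInner l i c with
  | case1 l i h => rw [remLen, if_pos h, if_pos rfl]
  | case2 l i c h hc l' h' ih =>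
      have hm : l[i] ∈ l := List.getElem_mem h
      have he := PySem.List.remove?_eq_some_erase l l[i] hm
      have hlen := List.length_erase_of_mem hm
      rw [he] at h'
      cases h'
      rw [ih, hlen]; conv_rhs => rw [remLen, if_pos h, if_neg hc]
  | case3 l i c h hc h' =>
      have hm : l[i] ∈ l := List.getElem_mem h
      rw [PySem.List.remove?_eq_some_erase l l[i] hm] at h'
      cases h'
  | case4 l i c h => rw [remLen, if_neg h]

lemma remLen_zero (m : Nat) : remLen m 0 0 = sFun m := by
  rw [remLen, remLen, remLen, remLen, sFun]
  split_ifs <;> first | contradiction | omega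

lemma foldl_remove_length {α : Type} (tc : List α) (l : List Int) :
    (tc.foldl (fun nc _ => pyRemoveInner nc 0 0) l).length = sIter tc.length l.length := by
  induction tc generalizing l with
  | nil => rfl
  | cons x xs ih =>
      simp only [List.foldl_cons, List.length_cons, sIter]
      rw [ih, pyRemoveInner_length, remLen_zero]

lemma sIter_big (L : Nat) : ∀ n, 3 * L + 2 ≤ n → sIter L n = n - 3 * L := by
  induction L with
  | zero => intro n _; simp [sIter]
  | succ k ih =>
      intro n hn
      have h5 : 5 ≤ n := by omega
      have hs : sFun n = n - 3 := by rw [sFun]; rw [if_pos h5]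
      rw [sIter, hs, ih (n - 3) (by omega)]
      omega

lemma sIter_3L : ∀ L, 1 ≤ L → sIter L (3 * L) = 1 := by
  intro L
  induction L with
  | zero => omega
  | succ k ih =>
      intro _
      by_cases hk : 1 ≤ k
      · have hs : sFun (3 * (k + 1)) = 3 * k := by rw [sFun]; split_ifs <;> omega
        rw [sIter, hs]; exact ih hk
      · have hk0 : k = 0 := by omega
        subst hk0
        decide

lemma sIter_3L1 : ∀ L, 1 ≤ L → sIter L (3 * L + 1) = 2 := by
  intro L
  induction L with
  | zero => omega
  | succ k ih =>
      intro _
      by_cases hk : 1 ≤ k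
      · have hs : sFun (3 * (k + 1) + 1) = 3 * k + 1 := by rw [sFun]; split_ifs <;> omega
        rw [sIter, hs]; exact ih hk
      · have hk0 : k = 0 := by omega
        subst hk0
        decide

lemma final_iff (L n : Nat) (hL : 2 ≤ L) (h3 : 3 * L ≤ n) (h4 : n % 4 = 0) :
    (sIter L n = L ↔ n = 4 * L) := by
  by_cases hbig : 3 * L + 2 ≤ n
  · rw [sIter_big L n hbig]; omega
  · have : n = 3 * L ∨ n = 3 * L + 1 := by omega
    rcases this with h | h
    · subst h
      rw [sIter_3L L (by omega)]
      omega
    · subst h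
      rw [sIter_3L1 L (by omega)]
      omega

-- ---- A's "three" accumulation loop ----

lemma mem_threeFold (cards : List Int) (v : Int) :
    ∀ (l acc : List Int),
      (v ∈ l.foldl (fun acc card =>
        if 3 ≤ cards.count card ∧ card ∉ acc then acc ++ [card] else acc) acc
      ↔ v ∈ acc ∨ (v ∈ l ∧ 3 ≤ cards.count v)) := by
  intro l
  induction l with
  | nil => intro acc; simp
  | cons x xs ih =>
      intro acc
      simp only [List.foldl_cons]
      by_cases hx : 3 ≤ cards.count x ∧ x ∉ acc
      · rw [if_pos hx, ih]
        simp only [List.mem_append, List.mem_cons, List.not_mem_nil, or_false]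
        obtain ⟨hx1, _⟩ := hx
        constructor
        · rintro ((h | rfl) | h)
          · exact Or.inl h
          · exact Or.inr ⟨Or.inl rfl, hx1⟩
          · exact Or.inr ⟨Or.inr h.1, h.2⟩
        · rintro (h | ⟨(rfl | h), hcnt⟩)
          · exact Or.inl (Or.inl h)
          · exact Or.inl (Or.inr rfl)
          · exact Or.inr ⟨h, hcnt⟩
      · rw [if_neg hx, ih]
        simp only [List.mem_cons]
        rw [not_and_or, not_not] at hx
        constructor
        · rintro (h | h)
          · exact Or.inl h
          · exact Or.inr ⟨Or.inr h.1, h.2⟩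
        · rintro (h | ⟨(rfl | h), hcnt⟩)
          · exact Or.inl h
          · rcases hx with h' | h'
            · exact absurd hcnt h'
            · exact Or.inl h'
          · exact Or.inr ⟨h, hcnt⟩

lemma nodup_threeFold (cards : List Int) :
    ∀ (l acc : List Int), acc.Nodup →
      (l.foldl (fun acc card =>
        if 3 ≤ cards.count card ∧ card ∉ acc then acc ++ [card] else acc) acc).Nodup := by
  intro l
  induction l with
  | nil => intro acc h; simpa
  | cons x xs ih =>
      intro acc h
      simp only [List.foldl_cons]
      by_cases hx : 3 ≤ cards.count x ∧ x ∉ acc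
      · rw [if_pos hx]
        exact ih _ (h.append (List.nodup_singleton _)
          (by simpa [List.disjoint_singleton] using hx.2))
      · rw [if_neg hx]; exact ih _ h

-- ---- distinct values each appearing ≥ 3 times need 3·|vs| cards ----

lemma three_count_le : ∀ (vs cards : List Int), vs.Nodup →
    (∀ v ∈ vs, 3 ≤ cards.count v) → 3 * vs.length ≤ cards.length := by
  intro vs
  induction vs with
  | nil => intro cards _ _; simp
  | cons v rest ih =>
      intro cards hnd hcnt
      have hlen : cards.length = cards.count v + (cards.filter (fun w => w ≠ v)).length := by
        rw [List.length_eq_countP_add_countP (fun w => w == v)]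
        have h1 : cards.count v = cards.countP (fun w => w == v) := by
          simp [List.count]
        have h2 : (cards.filter (fun w => w ≠ v)).length
            = cards.countP (fun w => decide ¬(w == v) = true) := by
          rw [← List.countP_eq_length_filter]
          apply List.countP_congr
          intro a _
          simp
        omega
      have hrest : 3 * rest.length ≤ (cards.filter (fun w => w ≠ v)).length := by
        apply ih _ (hnd.of_cons)
        intro w hw
        have hwv : w ≠ v := by
          rintro rfl
          exact (List.nodup_cons.mp hnd).1 hw
        have : (cards.filter (fun x => x ≠ v)).count w = cards.count w := by
          apply List.count_filter
          simp [hwv]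
        rw [this]
        exact hcnt w (List.mem_cons_of_mem _ hw)
      have hv : 3 ≤ cards.count v := hcnt v (List.mem_cons_self)
      simp only [List.length_cons]
      omega

-- ---- A's three_connect scan, viewed over Nat indices ----

def adjStep (t : List Int) (tc : List Int) (k : Nat) : List Int :=
  if t.getD k 0 + 1 = t.getD (k + 1) 0 then
    let tc1 := if t.getD k 0 ∈ tc then tc else tc ++ [t.getD k 0]
    if t.getD (k + 1) 0 ∈ tc1 then tc1 else tc1 ++ [t.getD (k + 1) 0]
  else tc

lemma mem_adjStep (t l : List Int) (k : Nat) (v : Int) :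
    v ∈ adjStep t l k ↔ v ∈ l ∨ (t.getD k 0 + 1 = t.getD (k + 1) 0 ∧
      (v = t.getD k 0 ∨ v = t.getD (k + 1) 0)) := by
  simp only [adjStep]
  split_ifs with h1 h2 h3 h3
  · constructor
    · exact fun h => Or.inl h
    · rintro (h | ⟨_, rfl | rfl⟩)
      exacts [h, h2, h3]
  · simp only [List.mem_append, List.mem_singleton]
    constructor
    · rintro (h | rfl)
      exacts [Or.inl h, Or.inr ⟨h1, Or.inr rfl⟩]
    · rintro (h | ⟨_, rfl | rfl⟩)
      exacts [Or.inl h, Or.inl h2, Or.inr rfl]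
  · simp only [List.mem_append, List.mem_singleton]
    constructor
    · rintro (h | rfl)
      exacts [Or.inl h, Or.inr ⟨h1, Or.inl rfl⟩]
    · rintro (h | ⟨_, rfl | rfl⟩)
      · exact Or.inl h
      · exact Or.inr rfl
      · rcases List.mem_append.mp h3 with h | h
        · exact Or.inl h
        · exact Or.inr (List.mem_singleton.mp h)
  · simp only [List.mem_append, List.mem_singleton]
    constructor
    · rintro ((h | rfl) | rfl)
      exacts [Or.inl h, Or.inr ⟨h1, Or.inl rfl⟩, Or.inr ⟨h1, Or.inr rfl⟩]
    · rintro (h | ⟨_, rfl | rfl⟩)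
      exacts [Or.inl (Or.inl h), Or.inl (Or.inr rfl), Or.inr rfl]
  · constructor
    · exact Or.inl
    · rintro (h | ⟨hc, _⟩)
      exacts [h, absurd hc h1]

lemma nodup_adjStep (t l : List Int) (k : Nat) (h : l.Nodup) : (adjStep t l k).Nodup := by
  simp only [adjStep]
  split_ifs with h1 h2 h3 h3
  · exact h
  · exact h.append (List.nodup_singleton _) (by simpa [List.disjoint_singleton] using h3)
  · exact h.append (List.nodup_singleton _) (by simpa [List.disjoint_singleton] using h2)
  · exact (h.append (List.nodup_singleton _)
      (by simpa [List.disjoint_singleton] using h2)).append (List.nodup_singleton _)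
      (by simpa [List.disjoint_singleton] using h3)
  · exact h

lemma mem_adjFold (t : List Int) (v : Int) :
    ∀ (m : Nat) (acc : List Int),
      (v ∈ (List.range m).foldl (adjStep t) acc ↔
        v ∈ acc ∨ ∃ k, k < m ∧ t.getD k 0 + 1 = t.getD (k + 1) 0 ∧
          (v = t.getD k 0 ∨ v = t.getD (k + 1) 0)) := by
  intro m
  induction m with
  | zero => intro acc; simp
  | succ m ih =>
      intro acc
      rw [List.range_succ, List.foldl_append, List.foldl_cons, List.foldl_nil,
        mem_adjStep, ih]
      constructor
      · rintro ((h | ⟨k, hk, hc, hv⟩) | ⟨hc, hv⟩)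
        exacts [Or.inl h, Or.inr ⟨k, by omega, hc, hv⟩, Or.inr ⟨m, by omega, hc, hv⟩]
      · rintro (h | ⟨k, hk, hc, hv⟩)
        · exact Or.inl (Or.inl h)
        · by_cases hkm : k < m
          · exact Or.inl (Or.inr ⟨k, hkm, hc, hv⟩)
          · have hk' : k = m := by omega
            subst hk'
            exact Or.inr ⟨hc, hv⟩

lemma nodup_adjFold (t : List Int) :
    ∀ (m : Nat) (acc : List Int), acc.Nodup → ((List.range m).foldl (adjStep t) acc).Nodup := by
  intro m
  induction m with
  | zero => intro acc h; simpa
  | succ m ih =>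
      intro acc h
      rw [List.range_succ, List.foldl_append, List.foldl_cons, List.foldl_nil]
      exact nodup_adjStep _ _ _ (ih acc h)

-- on a strictly increasing list, the adjacent-pairs scan collects exactly the
-- values with a neighbour in the list
lemma adjExists_iff (t : List Int) (ht : t.Pairwise (· < ·)) (v : Int) :
    (∃ k, k < t.length - 1 ∧ t.getD k 0 + 1 = t.getD (k + 1) 0 ∧
      (v = t.getD k 0 ∨ v = t.getD (k + 1) 0))
    ↔ (v ∈ t ∧ ((v - 1) ∈ t ∨ (v + 1) ∈ t)) := by
  have hpw := List.pairwise_iff_getElem.mp ht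
  constructor
  · rintro ⟨k, hk, hc, hv⟩
    have hk1 : k + 1 < t.length := by omega
    have hk0 : k < t.length := by omega
    rw [List.getD_eq_getElem t 0 hk0, List.getD_eq_getElem t 0 hk1] at hc hv
    rcases hv with rfl | rfl
    · refine ⟨List.getElem_mem hk0, Or.inr ?_⟩
      rw [hc]
      exact List.getElem_mem hk1
    · refine ⟨List.getElem_mem hk1, Or.inl ?_⟩
      have : t[k + 1] - 1 = t[k] := by omega
      rw [this]
      exact List.getElem_mem hk0
  · rintro ⟨hv, hnb | hnb⟩
    · obtain ⟨j, hj, hje⟩ := List.getElem_of_mem hv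
      obtain ⟨j', hj', hje'⟩ := List.getElem_of_mem hnb
      have hlt : j' < j := by
        rcases Nat.lt_trichotomy j' j with h | h | h
        · exact h
        · exfalso; subst h; omega
        · exact absurd (hpw j j' hj hj' h) (by omega)
      have hj1 : j = j' + 1 := by
        by_contra hne
        have hmid : j' + 1 < j := by omega
        have h1 := hpw j' (j' + 1) hj' (by omega) (by omega)
        have h2 := hpw (j' + 1) j (by omega) hj hmid
        omega
      subst hj1
      refine ⟨j', by omega, ?_, Or.inr ?_⟩
      · rw [List.getD_eq_getElem t 0 hj', List.getD_eq_getElem t 0 (by omega : j' + 1 < t.length)]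
        omega
      · rw [List.getD_eq_getElem t 0 (by omega : j' + 1 < t.length)]
        exact hje.symm
    · obtain ⟨j, hj, hje⟩ := List.getElem_of_mem hv
      obtain ⟨j', hj', hje'⟩ := List.getElem_of_mem hnb
      have hlt : j < j' := by
        rcases Nat.lt_trichotomy j j' with h | h | h
        · exact h
        · exfalso; subst h; omega
        · exact absurd (hpw j' j hj' hj h) (by omega)
      have hj1 : j' = j + 1 := by
        by_contra hne
        have hmid : j + 1 < j' := by omega
        have h1 := hpw j (j + 1) hj (by omega) (by omega)
        have h2 := hpw (j + 1) j' (by omega) hj' hmid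
        omega
      subst hj1
      refine ⟨j, by omega, ?_, Or.inl ?_⟩
      · rw [List.getD_eq_getElem t 0 hj, List.getD_eq_getElem t 0 (by omega : j + 1 < t.length)]
        omega
      · rw [List.getD_eq_getElem t 0 hj]
        exact hje.symm

-- ---- main equivalence ----

theorem is_f_single_eq_alt (cards : List Int) :
    is_f_single cards = is_f_single_alt cards := by
  by_cases h8 : cards.length < 8
  · simp [is_f_single, is_f_single_alt, h8]
  by_cases h4 : cards.length % 4 = 0
  swap
  · simp [is_f_single, is_f_single_alt, h8, h4]
  simp only [is_f_single, is_f_single_alt]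
  rw [if_neg h8, if_neg (not_not_intro h4),
    if_neg (by omega : ¬(cards.length < 8 ∨ cards.length % 4 ≠ 0))]
  rw [PySem.Dict.foldl_insert_getD_add_one_eq_counter]
  set three := List.foldl (fun acc card =>
    if 3 ≤ List.count card cards ∧ card ∉ acc then acc ++ [card] else acc) ([] : List Int) cards
    with hthree
  set threeS := PySem.List.sorted three (fun x => x) false with hts
  set tc := List.foldl (fun tc i =>
      if PySem.List.pyGetD threeS i 0 + 1 = PySem.List.pyGetD threeS (i + 1) 0 then
        if PySem.List.pyGetD threeS (i + 1) 0 ∈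
            (if PySem.List.pyGetD threeS i 0 ∈ tc then tc
             else tc ++ [PySem.List.pyGetD threeS i 0]) then
          (if PySem.List.pyGetD threeS i 0 ∈ tc then tc
           else tc ++ [PySem.List.pyGetD threeS i 0])
        else
          (if PySem.List.pyGetD threeS i 0 ∈ tc then tc
           else tc ++ [PySem.List.pyGetD threeS i 0]) ++ [PySem.List.pyGetD threeS (i + 1) 0]
      else tc) ([] : List Int)
      (PySem.List.pyRange 0 ((threeS.length : Int) - 1) 1) with htc
  set triples := List.map (fun p => p.1)
    (List.filter (fun p => decide (3 ≤ p.2)) (PySem.Dict.counter cards).items) with htrip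
  set connected := List.filter (fun v => decide (v - 1 ∈ triples ∨ v + 1 ∈ triples)) triples
    with hconn
  -- membership and nodup facts
  have hmem3 : ∀ v : Int, v ∈ three ↔ v ∈ cards ∧ 3 ≤ List.count v cards := by
    intro v
    rw [hthree]
    simpa using mem_threeFold cards v cards []
  have hnd3 : three.Nodup := by
    rw [hthree]; exact nodup_threeFold cards cards [] List.nodup_nil
  have hmemT : ∀ v : Int, v ∈ triples ↔ v ∈ cards ∧ 3 ≤ List.count v cards := by
    intro v
    rw [htrip, PySem.Dict.items_counter, List.filter_map, List.map_map]
    simp only [Function.comp_def, List.mem_map, List.mem_filter, PySem.Set.mem_ofList,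
      decide_eq_true_eq]
    constructor
    · rintro ⟨a, ⟨ha, hd⟩, rfl⟩
      exact ⟨ha, by omega⟩
    · rintro ⟨hv, hc⟩
      exact ⟨v, ⟨hv, by omega⟩, rfl⟩
  have hndT : triples.Nodup := by
    rw [htrip, PySem.Dict.items_counter, List.filter_map, List.map_map]
    simp only [Function.comp_def]
    simpa using (PySem.Set.nodup_ofList cards).filter
      (fun x : Int => decide (3 ≤ (List.count x cards : Int)))
  -- empty-triples branch
  by_cases hE : three.length = 0
  · have h3nil : three = [] := List.length_eq_zero_iff.mp hE
    have hTnil : triples = [] := by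
      rw [List.eq_nil_iff_forall_not_mem]
      intro v hv
      have h2 := (hmem3 v).mpr ((hmemT v).mp hv)
      rw [h3nil] at h2
      exact List.not_mem_nil h2
    rw [if_pos hE, if_pos hTnil]
  have hTne : ¬ triples = [] := by
    intro hnil
    apply hE
    rw [List.length_eq_zero_iff, List.eq_nil_iff_forall_not_mem]
    intro v hv
    have h2 := (hmemT v).mpr ((hmem3 v).mp hv)
    rw [hnil] at h2
    exact List.not_mem_nil h2
  rw [if_neg hE, if_neg hTne]
  -- sorted list facts
  have hpermS : threeS.Perm three := by rw [hts]; exact PySem.List.sorted_perm three (fun x => x) false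
  have hndS : threeS.Nodup := hpermS.nodup_iff.mpr hnd3
  have hlt : threeS.Pairwise (· < ·) := by
    have hle : threeS.Pairwise (fun a b => a ≤ b) := by
      rw [hts]
      exact PySem.List.sorted_pairwise three (fun x => x)
    rw [List.pairwise_iff_getElem] at hle ⊢
    intro i j hi hj hij
    have h1 := hle i j hi hj hij
    have h2 := List.pairwise_iff_getElem.mp hndS i j hi hj hij
    omega
  -- the adjacency scan
  have hrange : PySem.List.pyRange 0 ((threeS.length : Int) - 1) 1
      = List.map (fun k : Nat => (k : Int)) (List.range (threeS.length - 1)) := by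
    rw [PySem.List.pyRange_one]
    have h1 : (((threeS.length : Int) - 1) - 0).toNat = threeS.length - 1 := by omega
    rw [h1]
    simp
  have htc2 : tc = (List.range (threeS.length - 1)).foldl (adjStep threeS) [] := by
    rw [htc, hrange, List.foldl_map]
    congr 1
    funext acc k
    simp only [adjStep]
    have hcast : ((k : Int) + 1) = (((k + 1 : Nat)) : Int) := by push_cast; ring
    rw [hcast]
    simp only [PySem.List.pyGetD_natCast]
  have hmemtc : ∀ v : Int, v ∈ tc ↔ v ∈ threeS ∧ ((v - 1) ∈ threeS ∨ (v + 1) ∈ threeS) := by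
    intro v
    rw [htc2, mem_adjFold]
    simp only [List.not_mem_nil, false_or]
    exact adjExists_iff threeS hlt v
  have hndtc : tc.Nodup := by
    rw [htc2]; exact nodup_adjFold threeS _ [] List.nodup_nil
  have hmemC : ∀ v : Int, v ∈ connected ↔ v ∈ triples ∧ ((v - 1) ∈ triples ∨ (v + 1) ∈ triples) := by
    intro v
    rw [hconn]
    simp [List.mem_filter]
  have hndC : connected.Nodup := by rw [hconn]; exact hndT.filter _
  have hmemST : ∀ v : Int, v ∈ threeS ↔ v ∈ triples := by
    intro v
    rw [hpermS.mem_iff, hmem3, hmemT]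
  have hpermC : tc.Perm connected := by
    rw [List.perm_ext_iff_of_nodup hndtc hndC]
    intro v
    rw [hmemtc, hmemC, hmemST, hmemST, hmemST]
  have hlenC : tc.length = connected.length := hpermC.length_eq
  -- the < 2 and ≥ 15 guards
  by_cases hlen2 : tc.length < 2
  · rw [if_pos hlen2, if_pos (Or.inl (hlenC ▸ hlen2))]
  have hany : (tc.any fun i => decide (15 ≤ i)) = (connected.any fun v => decide (15 ≤ v)) := by
    rw [Bool.eq_iff_iff, List.any_eq_true, List.any_eq_true]
    constructor
    · rintro ⟨x, hx, hd⟩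
      exact ⟨x, hpermC.mem_iff.mp hx, hd⟩
    · rintro ⟨x, hx, hd⟩
      exact ⟨x, hpermC.mem_iff.mpr hx, hd⟩
  by_cases h15 : (tc.any fun i => decide (15 ≤ i)) = true
  · rw [if_neg hlen2, if_pos h15, if_pos (Or.inr (hany ▸ h15))]
  rw [if_neg hlen2, if_neg h15, if_neg (show ¬(connected.length < 2 ∨
      (connected.any fun v => decide (15 ≤ v)) = true) from by
    rintro (h | h)
    · exact hlen2 (hlenC ▸ h)
    · exact h15 (hany ▸ h))]
  -- the final length test
  rw [foldl_remove_length, hlenC]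
  have hL2 : 2 ≤ connected.length := by omega
  have h3L : 3 * connected.length ≤ cards.length := by
    apply three_count_le connected cards hndC
    intro v hv
    exact ((hmemT v).mp ((hmemC v).mp hv).1).2
  have hiff := final_iff connected.length cards.length hL2 h3L h4
  by_cases hfin : cards.length = 4 * connected.length
  · rw [if_neg (not_not_intro (hiff.mpr hfin))]
    exact (decide_eq_true hfin).symm
  · rw [if_pos (fun heq => hfin (hiff.mp heq))]
    exact (decide_eq_false hfin).symm


-- ===== VERDICT (by name: the statement is the Claim_ definition above) =====
theorem is_f_single_spec : Claim_equal_is_f_single := by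
  intro cards _
  unfold Spec_is_f_single
  exact is_f_single_eq_alt cards
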